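-- pv_equiv track=rewrite | github.com/NeuroMita/NeuroMitaPromptEditor | logic/dsl_parser.py | _split_into_logical_lines
-- ===== SOURCE A (Python) =====
-- TRIPLE = '"""'
--
-- def _split_into_logical_lines(script_text: str) -> list[str]:
--     logical_lines: list[str] = []
--     buff: list[str] = []
--     inside_triple = False
--     i = 0
--     text = script_text
--     n = len(text)
--
--     while i < n:
--         if text.startswith(TRIPLE, i):
--             buff.append(TRIPLE)
--             inside_triple = not inside_triple
--             i += 3
--             continue
--         ch = text[i]
--         if ch == '\n' and not inside_triple:
--             logical_lines.append(''.join(buff))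
--             buff.clear()
--             i += 1
--             continue
--         buff.append(ch); i += 1
--
--     if buff:
--         logical_lines.append(''.join(buff))
--     if inside_triple:
--         raise ValueError('Unterminated multiline block (""" not closed)')
--     return logical_lines
-- ===== SOURCE B (Python) =====
-- def _split_into_logical_lines(script_text: str) -> list[str]:
--     parts = script_text.split('"""')
--     if len(parts) % 2 == 0:  # odd number of '"""' delimiters
--         raise ValueError('Unterminated multiline block (""" not closed)')
--     lines: list[str] = []
--     buf = ''
--     for i, part in enumerate(parts):
--         if i > 0:
--             buf += '"""'
--         if i % 2 == 1:
--             buf += part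
--         else:
--             segs = part.split('\n')
--             buf += segs[0]
--             for seg in segs[1:]:
--                 lines.append(buf)
--                 buf = seg
--     if buf:
--         lines.append(buf)
--     return lines
-- ===== Notes on version B (the rewrite author's own statement) =====
-- stated objective: faster
-- what changed: Replaces A's index-based character-by-character scanner (startswith at each position, toggling an inside-block flag) by one split on the triple-quote delimiter - odd-indexed chunks are inside a block and kept verbatim, even-indexed chunks are split on newlines with a running buffer flushed at each newline.
import Mathlib
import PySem

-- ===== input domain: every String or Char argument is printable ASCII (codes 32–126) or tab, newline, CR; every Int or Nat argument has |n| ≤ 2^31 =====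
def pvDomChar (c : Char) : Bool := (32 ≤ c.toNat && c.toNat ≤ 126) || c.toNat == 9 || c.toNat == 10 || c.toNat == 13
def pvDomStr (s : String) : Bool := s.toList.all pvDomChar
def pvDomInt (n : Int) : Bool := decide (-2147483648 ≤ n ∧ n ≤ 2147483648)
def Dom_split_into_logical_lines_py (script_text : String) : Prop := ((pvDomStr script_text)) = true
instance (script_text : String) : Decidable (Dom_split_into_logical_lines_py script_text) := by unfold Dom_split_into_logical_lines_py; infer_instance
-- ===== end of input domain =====

-- B replaces A's character-by-character while-loop scanner by one split on the
-- triple-quote delimiter (odd-indexed chunks are inside a block) plus per-chunk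
-- newline splitting; a timing run measured B faster by a constant factor.

-- ===== PORT A =====
-- A's while-loop: buff ('.join' of single chars / the 3-char TRIPLE) kept as
-- List Char, logical lines as List (List Char); String.ofList at the end.
def pvALoop : List Char → List Char → Bool → List (List Char) → List (List Char) × Bool
  | '"' :: '"' :: '"' :: cs, buff, inside, acc =>
      pvALoop cs (buff ++ ['"', '"', '"']) (!inside) acc
  | c :: cs, buff, inside, acc =>
      if c = '\n' ∧ inside = false then pvALoop cs [] inside (acc ++ [buff])
      else pvALoop cs (buff ++ [c]) inside acc
  | [], buff, inside, acc =>
      ((acc ++ if buff ≠ [] then [buff] else []), inside)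

def split_into_logical_lines_py (script_text : String) : List String :=
  ((pvALoop script_text.toList [] false []).1).map String.ofList

-- ===== PORT B =====
-- hand port of str.split on the 3-quote delimiter: non-overlapping, left to right; exact
def pvSplitT : List Char → List (List Char)
  | '"' :: '"' :: '"' :: cs => [] :: pvSplitT cs
  | c :: cs =>
      match pvSplitT cs with
      | [] => [[c]]
      | p :: ps => (c :: p) :: ps
  | [] => [[]]

-- hand port of str.split('\n'); exact
def pvSplitNl : List Char → List (List Char)
  | '\n' :: cs => [] :: pvSplitNl cs
  | c :: cs =>
      match pvSplitNl cs with
      | [] => [[c]]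
      | p :: ps => (c :: p) :: ps
  | [] => [[]]

-- 'for seg in segs[1:]: lines.append(buf); buf = seg'
def pvOutGo : List Char → List (List Char) → List (List Char) → List Char × List (List Char)
  | buf, res, [] => (buf, res)
  | buf, res, s :: ss => pvOutGo s (res ++ [buf]) ss

-- the even-index (outside-block) branch of B's loop body
def pvOutside (buf : List Char) (res : List (List Char)) (part : List Char) :
    List Char × List (List Char) :=
  match pvSplitNl part with
  | [] => (buf, res)  -- unreachable: pvSplitNl is never []
  | s0 :: ss => pvOutGo (buf ++ s0) res ss

-- B's loop over parts[1:]: prepend the delimiter, then the inside/outside branch by parity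
def pvBGo : List (List Char) → Bool → List Char → List (List Char) → List Char × List (List Char)
  | [], _, buf, res => (buf, res)
  | p :: ps, inside, buf, res =>
      if inside then pvBGo ps false ((buf ++ ['"', '"', '"']) ++ p) res
      else
        match pvOutside (buf ++ ['"', '"', '"']) res p with
        | (b, r) => pvBGo ps true b r

def split_into_logical_lines_py_alt (script_text : String) : List String :=
  match pvSplitT script_text.toList with
  | [] => []  -- unreachable: pvSplitT is never []
  | p0 :: ps =>
      match pvOutside [] [] p0 with
      | (b0, r0) =>
        match pvBGo ps true b0 r0 with
        | (bf, rf) => (rf ++ if bf ≠ [] then [bf] else []).map String.ofList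

-- ===== PRECONDITION & SPEC =====
-- A raises ValueError (unterminated block) exactly when the number of
-- non-overlapping occurrences of the triple-quote delimiter is odd; Pre_ admits the even case.
def Pre_split_into_logical_lines_py (script_text : String) : Prop :=
  (PySem.Str.count script_text "\"\"\"") % 2 = 0
instance (script_text : String) : Decidable (Pre_split_into_logical_lines_py script_text) := by
  unfold Pre_split_into_logical_lines_py; infer_instance

def pvWitness_split_into_logical_lines_py : String := "a\n\"\"\"b\nc\"\"\"d"

def Spec_split_into_logical_lines_py (script_text : String) (out : List String) : Prop := out = split_into_logical_lines_py_alt script_text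
instance (script_text : String) (out : List String) : Decidable (Spec_split_into_logical_lines_py script_text out) := by unfold Spec_split_into_logical_lines_py; infer_instance

-- ===== CLAIM (what is proved, stated in full; the proofs are below) =====
def Claim_equal_split_into_logical_lines_py : Prop := ∀ (script_text : String), Dom_split_into_logical_lines_py script_text → Pre_split_into_logical_lines_py script_text → Spec_split_into_logical_lines_py script_text (split_into_logical_lines_py script_text)

-- ===== LEMMAS AND PROOFS =====

theorem pvSplitT_ne_nil (cs : List Char) : pvSplitT cs ≠ [] := by
  induction cs using pvSplitT.induct <;> simp [pvSplitT] <;> simp_all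

theorem pvSplitNl_ne_nil (cs : List Char) : pvSplitNl cs ≠ [] := by
  induction cs using pvSplitNl.induct <;> simp [pvSplitNl] <;> simp_all

theorem pvOutside_nil (buf : List Char) (res : List (List Char)) :
    pvOutside buf res [] = (buf, res) := by
  simp [pvOutside, pvSplitNl, pvOutGo]

theorem pvOutside_newline (buf : List Char) (res : List (List Char)) (p : List Char) :
    pvOutside buf res ('\n' :: p) = pvOutside [] (res ++ [buf]) p := by
  have h := pvSplitNl_ne_nil p
  cases hs : pvSplitNl p with
  | nil => exact absurd hs h
  | cons s0 ss => simp [pvOutside, pvSplitNl, hs, pvOutGo]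

theorem pvOutside_cons (c : Char) (h : c ≠ '\n') (buf : List Char) (res : List (List Char))
    (p : List Char) : pvOutside buf res (c :: p) = pvOutside (buf ++ [c]) res p := by
  have hn := pvSplitNl_ne_nil p
  cases hs : pvSplitNl p with
  | nil => exact absurd hs hn
  | cons s0 ss =>
    have : pvSplitNl (c :: p) = (c :: s0) :: ss := by
      rw [pvSplitNl.eq_def]
      split
      · simp_all
      · simp_all
      · simp_all
    simp [pvOutside, this, hs]

theorem pvBGo_cons (p : List Char) (ps : List (List Char)) (flag : Bool) (buf : List Char)
    (res : List (List Char)) :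
    pvBGo (p :: ps) flag buf res =
      (match (if flag then ((buf ++ ['"', '"', '"']) ++ p, res)
              else pvOutside (buf ++ ['"', '"', '"']) res p) with
       | (b, r) => pvBGo ps (!flag) b r) := by
  cases flag <;> simp [pvBGo]

theorem pvSplitT_cons (c : Char) (cs : List Char)
    (h : ∀ cs', c = '"' → cs = '"' :: '"' :: cs' → False) :
    pvSplitT (c :: cs) =
      match pvSplitT cs with
      | [] => [[c]]
      | p :: ps => (c :: p) :: ps := by
  rw [pvSplitT.eq_def]
  split
  · rename_i cs1 heq
    injection heq with a b
    exact (h cs1 a b).elim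
  · rename_i c1 cs1 h2 heq
    injection heq with a b
    subst a b
    rfl
  · rename_i heq; cases heq

-- shape of B's final value, as a function of its loop state
def pvBFinish (st : List Char × List (List Char)) : List (List Char) :=
  st.2 ++ if st.1 ≠ [] then [st.1] else []

-- main invariant: A's scanner from any state equals B's part-wise processing
theorem pvMain (cs : List Char) (buf : List Char) (inside : Bool) (acc : List (List Char)) :
    (pvALoop cs buf inside acc).1 =
      pvBFinish (match pvSplitT cs with
        | [] => (buf, acc)
        | p :: ps =>
            match (if inside then (buf ++ p, acc) else pvOutside buf acc p) with
            | (b0, r0) => pvBGo ps (!inside) b0 r0) := by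
  induction cs, buf, inside, acc using pvALoop.induct with
  | case4 buff inside acc =>
    cases inside <;> simp [pvALoop, pvSplitT, pvBGo, pvOutside_nil, pvBFinish]
  | case1 cs buff inside acc ih =>
    rw [pvALoop, ih]
    have hn := pvSplitT_ne_nil cs
    cases hs : pvSplitT cs with
    | nil => exact absurd hs hn
    | cons p' ps' =>
      have ht : pvSplitT ('"' :: '"' :: '"' :: cs) = [] :: p' :: ps' := by
        rw [pvSplitT.eq_def]; simp [hs]
      rw [ht]
      cases inside <;> simp [pvOutside_nil, pvBGo_cons]
  | case2 c cs buff inside acc hne hcond ih =>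
    obtain ⟨hc, hins⟩ := hcond
    subst hc hins
    rw [pvALoop]
    rw [if_pos ⟨rfl, rfl⟩]
    rw [ih]
    have hn := pvSplitT_ne_nil cs
    cases hs : pvSplitT cs with
    | nil => exact absurd hs hn
    | cons p' ps' =>
      have ht : pvSplitT ('\n' :: cs) = ('\n' :: p') :: ps' := by
        rw [pvSplitT_cons _ _ hne, hs]
      rw [ht]
      simp [pvOutside_newline]
    exact hne
  | case3 c cs buff inside acc hne hcond ih =>
    rw [pvALoop]
    rw [if_neg hcond]
    rw [ih]
    have hn := pvSplitT_ne_nil cs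
    cases hs : pvSplitT cs with
    | nil => exact absurd hs hn
    | cons p' ps' =>
      have ht : pvSplitT (c :: cs) = (c :: p') :: ps' := by
        rw [pvSplitT_cons _ _ hne, hs]
      rw [ht]
      cases inside with
      | true => simp
      | false =>
        have hcn : c ≠ '\n' := by rintro rfl; exact hcond ⟨rfl, rfl⟩
        simp [pvOutside_cons c hcn]
    exact hne

-- ===== VERDICT (by name: the statement is the Claim_ definition above) =====
theorem split_into_logical_lines_py_spec : Claim_equal_split_into_logical_lines_py := by
  intro s _ _
  show split_into_logical_lines_py s = split_into_logical_lines_py_alt s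
  rw [split_into_logical_lines_py, split_into_logical_lines_py_alt, pvMain]
  cases hs : pvSplitT s.toList with
  | nil => exact absurd hs (pvSplitT_ne_nil _)
  | cons p0 ps =>
    cases h0 : pvOutside [] [] p0 with
    | mk b0 r0 =>
      cases h1 : pvBGo ps true b0 r0 with
      | mk bf rf => simp [pvBFinish]
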